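-- pv_equiv track=rewrite | github.com/github-roushan/ProjectEuler | euler8.py | leftDiagonal
-- ===== SOURCE A (Python) =====
-- def leftDiagonal(li, times):
--     row, col = len(li), len(li[0])
--     ans = 0
--     for r in range(row-times+1):
--         for c in range(col-times+1):
--             pr = 1
--             for i in range(times):
--                 pr*=li[r+i][c+i]
--             ans = max(ans, pr)
--     return ans
-- ===== SOURCE B (Python) =====
-- def leftDiagonal(li, times):
--     row, col = len(li), len(li[0])
--     if times > row or times > col:
--         return 0
--     diags = [[li[i][c + i] for i in range(min(row, col - c))] for c in range(col)]
--     diags += [[li[r + i][i] for i in range(min(row - r, col))] for r in range(1, row)]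
--     best = 0
--     for d in diags:
--         zeros, prod = 0, 1
--         for i in range(len(d)):
--             x = d[i]
--             if x == 0:
--                 zeros += 1
--             else:
--                 prod *= x
--             if i >= times:
--                 out = d[i - times]
--                 if out == 0:
--                     zeros -= 1
--                 else:
--                     prod //= out
--             if i >= times - 1:
--                 cand = prod if zeros == 0 else 0
--                 if cand > best:
--                     best = cand
--     return best
-- ===== Notes on version B (the rewrite author's own statement) =====
-- stated objective: alternative
-- what changed: A recomputes each length-`times` product from scratch for every start cell (three nested loops); B returns 0 outright when no window fits and otherwise extracts every down-right diagonal once and slides a window along it, maintaining a zero count and the product of the nonzero window entries, so no inner per-window product loop remains.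
-- outside the precondition, e.g. on leftDiagonal([[1]], -1): A returns 1, B raises IndexError; on leftDiagonal([[1]], 0): A returns 1, B returns 1
import Mathlib
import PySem

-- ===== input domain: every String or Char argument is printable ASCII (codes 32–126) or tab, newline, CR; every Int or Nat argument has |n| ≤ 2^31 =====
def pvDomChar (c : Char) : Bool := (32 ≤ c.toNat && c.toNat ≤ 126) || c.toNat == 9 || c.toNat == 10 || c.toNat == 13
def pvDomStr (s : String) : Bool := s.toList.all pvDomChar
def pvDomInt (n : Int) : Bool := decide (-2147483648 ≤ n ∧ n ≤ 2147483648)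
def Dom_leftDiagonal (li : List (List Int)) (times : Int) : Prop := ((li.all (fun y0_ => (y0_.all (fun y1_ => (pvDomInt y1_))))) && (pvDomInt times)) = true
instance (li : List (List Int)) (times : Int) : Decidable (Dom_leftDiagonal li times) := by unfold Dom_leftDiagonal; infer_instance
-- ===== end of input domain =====

-- B replaces A's per-cell recomputation of each length-`times` window product by one
-- sliding-window pass along every down-right diagonal, maintaining the zero count and the
-- product of the nonzero window entries (an alternative algorithm; it avoids the innermost
-- per-window loop, though a timing run measured no speedup on its input family).

-- ===== PORT A =====
def leftDiagonal (li : List (List Int)) (times : Int) : Int :=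
  let row : Int := (li.length : Int)
  let col : Int := ((PySem.List.pyGetD li 0 []).length : Int)
  (PySem.List.pyRange 0 (row - times + 1) 1).foldl (fun ans r =>
    (PySem.List.pyRange 0 (col - times + 1) 1).foldl (fun ans c =>
      max ans ((PySem.List.pyRange 0 times 1).foldl (fun pr i =>
        pr * PySem.List.pyGetD (PySem.List.pyGetD li (r + i) []) (c + i) 0) 1)) ans) 0

-- ===== PORT B =====
-- one step of B's sliding window: add d[i]; if i ≥ times drop d[i-times]; if the window is full,
-- compare its product (0 if it contains a zero, else the maintained nonzero product) with best
def bStep (times : Int) (d : List Int) (st : Int × Int × Int) (i : Int) : Int × Int × Int :=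
  let x := PySem.List.pyGetD d i 0
  let zp : Int × Int := if x = 0 then (st.1 + 1, st.2.1) else (st.1, st.2.1 * x)
  let zp : Int × Int :=
    if times ≤ i then
      let out := PySem.List.pyGetD d (i - times) 0
      if out = 0 then (zp.1 - 1, zp.2) else (zp.1, PySem.Int.floordiv zp.2 out)
    else zp
  let best :=
    if times - 1 ≤ i then
      let cand := if zp.1 = 0 then zp.2 else 0
      if st.2.2 < cand then cand else st.2.2
    else st.2.2
  (zp.1, zp.2, best)

def leftDiagonal_alt (li : List (List Int)) (times : Int) : Int :=
  let row : Int := (li.length : Int)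
  let col : Int := ((PySem.List.pyGetD li 0 []).length : Int)
  if times > row ∨ times > col then 0 else
  let diags : List (List Int) :=
    ((PySem.List.pyRange 0 col 1).map (fun c =>
      (PySem.List.pyRange 0 (min row (col - c)) 1).map (fun i =>
        PySem.List.pyGetD (PySem.List.pyGetD li i []) (c + i) 0)))
    ++ ((PySem.List.pyRange 1 row 1).map (fun r =>
      (PySem.List.pyRange 0 (min (row - r) col) 1).map (fun i =>
        PySem.List.pyGetD (PySem.List.pyGetD li (r + i) []) i 0)))
  diags.foldl (fun best d =>
    ((PySem.List.pyRange 0 ((d.length : Int)) 1).foldl (bStep times d) (0, 1, best)).2.2) 0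

-- ===== PRECONDITION & SPEC =====
-- Pre_ excludes: empty grids (A raises IndexError on li[0]); grids in which a window fits but a
-- later row is shorter than the first (both A and B raise IndexError there); and non-positive
-- window sizes times ≤ 0, a degenerate query on which A returns the empty product 1 after
-- scanning the whole grid while B's sliding window removes elements it never added
-- (IndexError for negative times).
def Pre_leftDiagonal (li : List (List Int)) (times : Int) : Prop :=
  li ≠ [] ∧ 1 ≤ times ∧
    ((times ≤ (li.length : Int) ∧ times ≤ ((li.headD []).length : Int)) →
      ∀ r ∈ li, (li.headD []).length ≤ r.length)
instance (li : List (List Int)) (times : Int) : Decidable (Pre_leftDiagonal li times) := by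
  unfold Pre_leftDiagonal; infer_instance
def pvWitness_leftDiagonal : List (List Int) × Int := ([[1, 2], [3, 4]], 2)
def Spec_leftDiagonal (li : List (List Int)) (times : Int) (out : Int) : Prop := out = leftDiagonal_alt li times
instance (li : List (List Int)) (times : Int) (out : Int) : Decidable (Spec_leftDiagonal li times out) := by unfold Spec_leftDiagonal; infer_instance

-- ===== CLAIM (what is proved, stated in full; the proofs are below) =====
def Claim_equal_leftDiagonal : Prop := ∀ (li : List (List Int)) (times : Int), Dom_leftDiagonal li times → Pre_leftDiagonal li times → Spec_leftDiagonal li times (leftDiagonal li times)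

-- ===== LEMMAS AND PROOFS =====

-- entry at row r, column c (0 outside the grid; inside Pre_ all accessed entries are in range)
def pvE (li : List (List Int)) (r c : Nat) : Int := (li.getD r []).getD c 0
-- the product A computes for the window starting at (r, c)
def pvP (li : List (List Int)) (t r c : Nat) : Int :=
  ((List.range t).map (fun i => pvE li (r + i) (c + i))).prod
-- the product of the length-t window of d starting at j
def pvWin (t : Nat) (d : List Int) (j : Nat) : Int := ((d.drop j).take t).prod
def pvWins (t : Nat) (d : List Int) : List Int := (List.range (d.length + 1 - t)).map (pvWin t d)
-- the diagonals of the grid, as B builds them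
def pvDiags (li : List (List Int)) : List (List Int) :=
  ((List.range (li.headD []).length).map (fun c =>
    (List.range (min li.length ((li.headD []).length - c))).map (fun i => pvE li i (c + i))))
  ++ ((List.range (li.length - 1)).map (fun k =>
    (List.range (min (li.length - (1 + k)) (li.headD []).length)).map (fun i => pvE li (1 + k + i) i)))

lemma pv_cast_range (m : Nat) :
    PySem.List.pyRange 0 (m : Int) 1 = (List.range m).map (fun (k : Nat) => (k : Int)) := by
  rw [PySem.List.pyRange_one]
  have h1 : (((m : Int) - 0)).toNat = m := by omega
  rw [h1]
  exact List.map_congr_left (fun k _ => by omega)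

lemma pv_cast_range2 (R t : Nat) :
    PySem.List.pyRange 0 ((R : Int) - (t : Int) + 1) 1
      = (List.range (R + 1 - t)).map (fun (k : Nat) => (k : Int)) := by
  rw [PySem.List.pyRange_one]
  have h : ((((R : Int) - (t : Int) + 1)) - 0).toNat = R + 1 - t := by omega
  rw [h]
  exact List.map_congr_left (fun k _ => by omega)

lemma pv_cast_range1 (m : Nat) :
    PySem.List.pyRange 1 (m : Int) 1 = (List.range (m - 1)).map (fun (k : Nat) => ((1 + k : Nat) : Int)) := by
  rw [PySem.List.pyRange_one]
  have h : (((m : Int)) - 1).toNat = m - 1 := by omega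
  rw [h]
  exact List.map_congr_left (fun k _ => by push_cast; omega)

lemma pv_E_congr (li : List (List Int)) {a b a' b' : Nat} (h1 : a = a') (h2 : b = b') :
    pvE li a b = pvE li a' b' := by rw [h1, h2]

lemma pv_foldl_max_le (L : List Int) (a b : Int) (hab : a ≤ b) (h : ∀ x ∈ L, x ≤ b) :
    L.foldl max a ≤ b := by
  induction L generalizing a with
  | nil => simpa using hab
  | cons y L ih =>
    simp only [List.foldl_cons]
    have hy : y ≤ b := h y (by simp)
    exact ih _ (max_le hab hy) (fun x hx => h x (by simp [hx]))

lemma pv_foldl_max_eq_of_mem_iff (L L' : List Int) (a : Int) (h : ∀ x, x ∈ L ↔ x ∈ L') :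
    L.foldl max a = L'.foldl max a := by
  apply le_antisymm
  · exact pv_foldl_max_le _ _ _ (PySem.List.le_foldl_max L' a).1
      (fun x hx => (PySem.List.le_foldl_max L' a).2 x ((h x).mp hx))
  · exact pv_foldl_max_le _ _ _ (PySem.List.le_foldl_max L a).1
      (fun x hx => (PySem.List.le_foldl_max L a).2 x ((h x).mpr hx))

lemma pv_foldl_flatMap {α : Type} (L : List α) (f : α → List Int) (a : Int) :
    L.foldl (fun acc x => (f x).foldl max acc) a = (L.flatMap f).foldl max a := by
  induction L generalizing a with
  | nil => simp
  | cons y L ih => simp [List.foldl_append, ih]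

lemma pv_foldl2_max {α β : Type} (Lr : List α) (Lc : List β) (g : α → β → Int) (a : Int) :
    Lr.foldl (fun ans r => Lc.foldl (fun ans c => max ans (g r c)) ans) a
      = (Lr.flatMap (fun r => Lc.map (g r))).foldl max a := by
  induction Lr generalizing a with
  | nil => simp
  | cons r Lr ih =>
    simp only [List.foldl_cons, List.flatMap_cons, List.foldl_append, ih]
    congr 1
    rw [List.foldl_map]

lemma pv_maxsel (b c : Int) : (if b < c then c else b) = max b c := by
  rcases lt_or_ge b c with h | h <;> simp [max_def, h] <;> omega

lemma pv_fdiv_cancel (a k : Int) (h : a ≠ 0) : PySem.Int.floordiv (a * k) a = k := by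
  have h2 := PySem.Int.floordiv_mul_add_mod (a * k) a
  have h3 : PySem.Int.mod (a * k) a = 0 := by
    rw [PySem.Int.mod_eq_zero_iff_dvd]; exact Dvd.intro k rfl
  rw [h3, add_zero] at h2
  have hq : PySem.Int.floordiv (a * k) a * a = k * a := by linarith
  exact mul_right_cancel₀ h hq

lemma pv_prod_eq_if (L : List Int) :
    L.prod = if L.countP (fun x => x == 0) = 0 then (L.filter (fun x => x != 0)).prod else 0 := by
  by_cases h : ∀ x ∈ L, x ≠ 0
  · have hc : L.countP (fun x => x == 0) = 0 := by
      rw [List.countP_eq_zero]; intro x hx; simpa using h x hx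
    have hf : L.filter (fun x => x != 0) = L := by
      rw [List.filter_eq_self]; intro x hx; simpa using h x hx
    simp [hc, hf]
  · push_neg at h
    obtain ⟨x, hx, hx0⟩ := h
    have hz : (0 : Int) ∈ L := by rw [← hx0]; exact hx
    have hc : L.countP (fun x => x == 0) ≠ 0 :=
      fun hcc => by simpa using (List.countP_eq_zero.mp hcc) 0 hz
    simp [hc, List.prod_eq_zero hz]

lemma pv_range_slice (m j t : Nat) (h : j + t ≤ m) :
    ((List.range m).drop j).take t = (List.range t).map (fun i => j + i) := by
  apply List.ext_getElem
  · simp; omega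
  · intro i h1 h2
    simp [List.getElem_take, List.getElem_drop]

lemma pv_fdiv_shape (a m x : Int) (ha : a ≠ 0) : PySem.Int.floordiv (a * m * x) a = m * x := by
  rw [mul_assoc]; exact pv_fdiv_cancel _ _ ha

lemma pv_max_if_congr (B c c' : Int) (h : c = c') : (if B < c then c else B) = max B c' := by
  rw [h, pv_maxsel]

lemma pv_slide (t : Nat) (ht : 1 ≤ t) (d : List Int) (b0 : Int) (n : Nat) (hn : n ≤ d.length) :
    ((List.range n).map (fun (k : Nat) => (k : Int))).foldl (bStep (t : Int) d) (0, 1, b0)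
      = ((((d.take n).drop (n - t)).countP (fun x => x == 0) : Int),
         (((d.take n).drop (n - t)).filter (fun x => x != 0)).prod,
         ((List.range (n + 1 - t)).map (pvWin t d)).foldl max b0) := by
  induction n with
  | zero =>
    have h0 : 0 + 1 - t = 0 := by omega
    simp [h0]
  | succ n ih =>
    have hlt : n < d.length := by omega
    have hn' : n ≤ d.length := by omega
    rw [List.range_succ, List.map_append, List.foldl_append, ih hn']
    simp only [List.map_cons, List.map_nil, List.foldl_cons, List.foldl_nil]
    have hx : PySem.List.pyGetD d ((n : Nat) : Int) 0 = d[n] := by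
      rw [PySem.List.pyGetD_natCast]
      exact List.getD_eq_getElem d 0 hlt
    have htake : d.take (n + 1) = d.take n ++ [d[n]] := by
      rw [List.take_succ]
      simp [List.getElem?_eq_getElem hlt]
    by_cases hts : t ≤ n
    · -- full window present before this step
      have htsI : ((t : Int)) ≤ ((n : Nat) : Int) := by exact_mod_cast hts
      have hts1I : ((t : Int)) - 1 ≤ ((n : Nat) : Int) := by omega
      have houtidx : (((n : Nat) : Int) - (t : Int)) = (((n - t : Nat)) : Int) := by omega
      have hout : PySem.List.pyGetD d (((n : Nat) : Int) - (t : Int)) 0 = d[n - t]'(by omega) := by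
        rw [houtidx, PySem.List.pyGetD_natCast]
        exact List.getD_eq_getElem d 0 (by omega)
      have hidx : n - t + 1 = n + 1 - t := by omega
      have hswap : (d.take (n + 1)).drop (n + 1 - t) = (d.drop (n + 1 - t)).take t := by
        rw [List.drop_take]
        congr 1
        omega
      have hcand : (if ((((d.take (n+1)).drop (n+1-t)).countP (fun x => x == 0) : Int)) = 0
            then (((d.take (n+1)).drop (n+1-t)).filter (fun x => x != 0)).prod else 0)
          = pvWin t d (n + 1 - t) := by
        have hpe := pv_prod_eq_if ((d.drop (n + 1 - t)).take t)
        rw [pvWin, hpe, ← hswap]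
        by_cases hz : ((d.take (n+1)).drop (n+1-t)).countP (fun x => x == 0) = 0 <;>
          simp [hz]
      have hwn : (d.take n).drop (n - t)
          = d[n - t]'(by omega) :: ((d.take n).drop (n + 1 - t)) := by
        rw [List.drop_eq_getElem_cons (by rw [List.length_take]; omega), hidx]
        congr 1
        exact List.getElem_take
      have hwn1 : (d.take (n + 1)).drop (n + 1 - t)
          = ((d.take n).drop (n + 1 - t)) ++ [d[n]] := by
        rw [htake, List.drop_append_of_le_length (by rw [List.length_take]; omega)]
      have hwins : (List.range (n + 1 + 1 - t)).map (pvWin t d)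
          = (List.range (n + 1 - t)).map (pvWin t d) ++ [pvWin t d (n + 1 - t)] := by
        have h2 : n + 1 + 1 - t = (n + 1 - t) + 1 := by omega
        rw [h2, List.range_succ, List.map_append, List.map_cons, List.map_nil]
      rw [hwins, List.foldl_append, List.foldl_cons, List.foldl_nil, ← hcand]
      rw [hwn1, hwn]
      simp only [List.countP_cons, List.countP_append, List.filter_cons, List.filter_append,
        List.prod_cons, List.prod_append, List.countP_nil, List.filter_nil, List.prod_nil]
      by_cases hdo : d[n - t]'(by omega) = 0 <;> by_cases hdn : d[n] = 0 <;>
        · simp only [bStep, hx, hout, htsI, hts1I, hdo, hdn, beq_iff_eq, bne_iff_ne, ne_eq,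
            if_true, if_false, ite_true, ite_false, not_true, not_false_iff, if_pos, if_neg,
            decide_eq_true_eq, pv_fdiv_shape, pv_fdiv_cancel, mul_one, one_mul]
          refine Prod.ext ?_ (Prod.ext ?_ ?_)
          · push_cast
            try omega
          · try simp [pv_fdiv_shape, pv_fdiv_cancel, hdo]
            try simp only [List.prod_nil, List.prod_singleton, mul_one]
            try ring
          · refine pv_max_if_congr _ _ _ ?_
            split_ifs <;> (try push_cast at *) <;> try omega
            all_goals try simp only [List.prod_cons, List.prod_nil, List.prod_singleton, mul_one]
            all_goals try simp [pv_fdiv_shape, pv_fdiv_cancel, hdo]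
            all_goals try rfl
            all_goals try ring
    · -- window still growing
      have htsI : ¬ ((t : Int)) ≤ ((n : Nat) : Int) := by exact_mod_cast hts
      have h0 : n - t = 0 := by omega
      have h1 : n + 1 - t = 0 := by omega
      by_cases ht1 : t = n + 1
      · have hts1I : ((t : Int)) - 1 ≤ ((n : Nat) : Int) := by omega
        have hwins : (List.range (n + 1 + 1 - t)).map (pvWin t d) = [pvWin t d 0] := by
          have h2 : n + 1 + 1 - t = 1 := by omega
          rw [h2]
          simp
        have hswap0 : d.take (n + 1) = (d.drop 0).take t := by
          rw [List.drop_zero, ht1]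
        have hcand : (if (((d.take (n+1)).countP (fun x => x == 0) : Int)) = 0
              then ((d.take (n+1)).filter (fun x => x != 0)).prod else 0)
            = pvWin t d 0 := by
          have hpe := pv_prod_eq_if ((d.drop 0).take t)
          rw [pvWin, hpe, ← hswap0]
          by_cases hz : (d.take (n+1)).countP (fun x => x == 0) = 0 <;> simp [hz]
        rw [hwins, h1, h0, List.drop_zero, List.drop_zero]
        rw [List.foldl_cons, List.foldl_nil, ← hcand]
        rw [htake]
        simp only [List.countP_cons, List.countP_append, List.filter_cons, List.filter_append,
          List.prod_cons, List.prod_append, List.countP_nil, List.filter_nil, List.prod_nil,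
          List.map_nil, List.foldl_nil]
        by_cases hdn : d[n] = 0 <;>
          · simp only [bStep, hx, htsI, hts1I, hdn, beq_iff_eq, bne_iff_ne, ne_eq,
              if_true, if_false, ite_true, ite_false, not_true, not_false_iff,
              decide_eq_true_eq, mul_one, one_mul]
            refine Prod.ext ?_ (Prod.ext ?_ ?_)
            · push_cast
              try omega
            · try simp only [List.prod_nil, List.prod_singleton, mul_one]
              try ring
            · refine pv_max_if_congr _ _ _ ?_
              split_ifs <;> (try push_cast at *) <;> try omega
              all_goals try simp only [List.prod_nil, List.prod_singleton, mul_one]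
              all_goals try rfl
              all_goals try ring
      · have hts1I : ¬ (((t : Int)) - 1 ≤ ((n : Nat) : Int)) := by
          have : n + 1 < t := by omega
          omega
        have h2 : n + 1 + 1 - t = 0 := by omega
        rw [h0, h1, h2, List.drop_zero, List.drop_zero, htake]
        simp only [List.range_zero, List.map_nil, List.foldl_nil, List.countP_append,
          List.countP_cons, List.filter_append, List.filter_cons, List.countP_nil,
          List.filter_nil, List.prod_append, List.prod_cons, List.prod_nil]
        by_cases hdn : d[n] = 0 <;>
          · simp only [bStep, hx, htsI, hts1I, hdn, beq_iff_eq, bne_iff_ne, ne_eq,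
              if_true, if_false, ite_true, ite_false, not_true, not_false_iff,
              decide_eq_true_eq, mul_one, one_mul]
            refine Prod.ext ?_ (Prod.ext ?_ ?_)
            · push_cast
              try omega
            · try simp only [List.prod_nil, List.prod_singleton, mul_one]
              try ring
            · rfl

lemma pv_prodA (li : List (List Int)) (t r c : Nat) :
    (PySem.List.pyRange 0 (t : Int) 1).foldl (fun pr i =>
      pr * PySem.List.pyGetD (PySem.List.pyGetD li ((r : Int) + i) []) ((c : Int) + i) 0) 1
    = pvP li t r c := by
  rw [pv_cast_range, List.foldl_map]
  have hfun : (fun (pr : Int) (k : Nat) =>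
      pr * PySem.List.pyGetD (PySem.List.pyGetD li ((r : Int) + (k : Int)) []) ((c : Int) + (k : Int)) 0)
      = fun pr k => pr * pvE li (r + k) (c + k) := by
    funext pr k
    have h1 : ((r : Int) + (k : Int)) = ((r + k : Nat) : Int) := by push_cast; ring
    have h2 : ((c : Int) + (k : Int)) = ((c + k : Nat) : Int) := by push_cast; ring
    rw [h1, h2, PySem.List.pyGetD_natCast, PySem.List.pyGetD_natCast]
    rfl
  rw [hfun, pvP, List.prod_eq_foldl, List.foldl_map]

lemma pv_A_char (li : List (List Int)) (t : Nat) (ht : 1 ≤ t) :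
    leftDiagonal li (t : Int)
      = ((List.range (li.length + 1 - t)).flatMap (fun r =>
          (List.range ((li.headD []).length + 1 - t)).map (fun c => pvP li t r c))).foldl max 0 := by
  have hcol : PySem.List.pyGetD li 0 [] = li.headD [] := by
    cases li <;> simp [PySem.List.pyGetD, PySem.List.pyGet?, PySem.List.pyIdx?]
  simp only [leftDiagonal, hcol]
  rw [← pv_foldl2_max]
  rw [pv_cast_range2 li.length t, pv_cast_range2 (li.headD []).length t]
  simp only [List.foldl_map]
  congr 1
  funext ans k
  congr 1
  funext ans2 c
  congr 1
  exact pv_prodA li t k c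

lemma pv_B_char (li : List (List Int)) (t : Nat) (ht : 1 ≤ t)
    (ht2 : t ≤ li.length) (ht3 : t ≤ (li.headD []).length) :
    leftDiagonal_alt li (t : Int) = ((pvDiags li).flatMap (pvWins t)).foldl max 0 := by
  have hcol : PySem.List.pyGetD li 0 [] = li.headD [] := by
    cases li <;> simp [PySem.List.pyGetD, PySem.List.pyGet?, PySem.List.pyIdx?]
  have hone : ∀ (b0 : Int) (d : List Int),
      ((PySem.List.pyRange 0 ((d.length : Nat) : Int) 1).foldl (bStep (t : Int) d) (0, 1, b0)).2.2
        = (pvWins t d).foldl max b0 := by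
    intro b0 d
    rw [pv_cast_range, pv_slide t ht d b0 d.length le_rfl]
    rfl
  have hd1 : (PySem.List.pyRange 0 (((li.headD []).length : Nat) : Int) 1).map (fun c =>
        (PySem.List.pyRange 0 (min ((li.length : Nat) : Int) ((((li.headD []).length : Nat) : Int) - c)) 1).map
          (fun i => PySem.List.pyGetD (PySem.List.pyGetD li i []) (c + i) 0))
      = (List.range (li.headD []).length).map (fun c =>
          (List.range (min li.length ((li.headD []).length - c))).map (fun i => pvE li i (c + i))) := by
    rw [pv_cast_range, List.map_map]
    apply List.map_congr_left
    intro c hc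
    rw [List.mem_range] at hc
    simp only [Function.comp]
    have hmin : (min ((li.length : Nat) : Int) ((((li.headD []).length : Nat) : Int) - ((c : Nat) : Int)))
        = ((min li.length ((li.headD []).length - c) : Nat) : Int) := by omega
    rw [hmin, pv_cast_range, List.map_map]
    apply List.map_congr_left
    intro i hi
    simp only [Function.comp]
    have h1 : (((c : Nat) : Int) + ((i : Nat) : Int)) = (((c + i : Nat)) : Int) := by push_cast; ring
    rw [h1, PySem.List.pyGetD_natCast, PySem.List.pyGetD_natCast]
    rfl
  have hd2 : (PySem.List.pyRange 1 ((li.length : Nat) : Int) 1).map (fun r =>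
        (PySem.List.pyRange 0 (min (((li.length : Nat) : Int) - r) (((li.headD []).length : Nat) : Int)) 1).map
          (fun i => PySem.List.pyGetD (PySem.List.pyGetD li (r + i) []) i 0))
      = (List.range (li.length - 1)).map (fun k =>
          (List.range (min (li.length - (1 + k)) (li.headD []).length)).map (fun i => pvE li (1 + k + i) i)) := by
    rw [pv_cast_range1, List.map_map]
    apply List.map_congr_left
    intro k hk
    rw [List.mem_range] at hk
    simp only [Function.comp]
    have hmin : (min (((li.length : Nat) : Int) - (((1 + k : Nat)) : Int)) (((li.headD []).length : Nat) : Int))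
        = ((min (li.length - (1 + k)) (li.headD []).length : Nat) : Int) := by omega
    rw [hmin, pv_cast_range, List.map_map]
    apply List.map_congr_left
    intro i hi
    simp only [Function.comp]
    have h1 : ((((1 + k : Nat)) : Int) + ((i : Nat) : Int)) = (((1 + k + i : Nat)) : Int) := by push_cast; ring
    rw [h1, PySem.List.pyGetD_natCast, PySem.List.pyGetD_natCast]
    rfl
  simp only [leftDiagonal_alt, hcol]
  rw [if_neg (by push_cast; omega)]
  rw [hd1, hd2]
  have hfun : (fun (best : Int) (d : List Int) =>
        ((PySem.List.pyRange 0 ((d.length : Nat) : Int) 1).foldl (bStep ((t : Nat) : Int) d) (0, 1, best)).2.2)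
      = fun best d => (pvWins t d).foldl max best :=
    funext fun b0 => funext fun d => hone b0 d
  rw [hfun]
  rw [pv_foldl_flatMap]
  rfl

lemma pv_win_of_map_range (f : Nat → Int) (m j t : Nat) (h : j + t ≤ m) :
    pvWin t ((List.range m).map f) j = ((List.range t).map (fun i => f (j + i))).prod := by
  unfold pvWin
  rw [← List.map_drop, ← List.map_take, pv_range_slice m j t h, List.map_map]
  rfl

lemma pv_wins_mem (t : Nat) (ht : 1 ≤ t) (m : Nat) (f : Nat → Int) (x : Int) :
    x ∈ pvWins t ((List.range m).map f)
      ↔ ∃ j, j + t ≤ m ∧ x = ((List.range t).map (fun i => f (j + i))).prod := by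
  simp only [pvWins, List.mem_map, List.mem_range, List.length_map, List.length_range]
  constructor
  · rintro ⟨j, hj, rfl⟩
    have hjt : j + t ≤ m := by omega
    exact ⟨j, hjt, pv_win_of_map_range f m j t hjt⟩
  · rintro ⟨j, hjt, rfl⟩
    exact ⟨j, by omega, pv_win_of_map_range f m j t hjt⟩

lemma pv_mem_iff (li : List (List Int)) (t : Nat) (ht : 1 ≤ t) (x : Int) :
    (x ∈ (List.range (li.length + 1 - t)).flatMap (fun r =>
          (List.range ((li.headD []).length + 1 - t)).map (fun c => pvP li t r c)))
      ↔ x ∈ (pvDiags li).flatMap (pvWins t) := by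
  simp only [List.mem_flatMap, List.mem_map, List.mem_range, pvDiags, List.mem_append]
  constructor
  · rintro ⟨r, hr, c, hc, rfl⟩
    by_cases hrc : r ≤ c
    · refine ⟨(List.range (min li.length ((li.headD []).length - (c - r)))).map
          (fun i => pvE li i ((c - r) + i)), Or.inl ⟨c - r, by omega, rfl⟩, ?_⟩
      rw [pv_wins_mem t ht]
      refine ⟨r, by omega, ?_⟩
      rw [pvP]
      exact congrArg List.prod (List.map_congr_left (fun i _ =>
        pv_E_congr li (by omega) (by omega)))
    · refine ⟨(List.range (min (li.length - (1 + (r - c - 1))) (li.headD []).length)).map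
          (fun i => pvE li (1 + (r - c - 1) + i) i), Or.inr ⟨r - c - 1, by omega, rfl⟩, ?_⟩
      rw [pv_wins_mem t ht]
      refine ⟨c, by omega, ?_⟩
      rw [pvP]
      exact congrArg List.prod (List.map_congr_left (fun i _ =>
        pv_E_congr li (by omega) (by omega)))
  · rintro ⟨d, hd | hd, hx⟩
    · obtain ⟨c0, hc0, rfl⟩ := hd
      rw [pv_wins_mem t ht] at hx
      obtain ⟨j, hj, rfl⟩ := hx
      refine ⟨j, by omega, c0 + j, by omega, ?_⟩
      rw [pvP]
      exact congrArg List.prod (List.map_congr_left (fun i _ =>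
        pv_E_congr li (by omega) (by omega)))
    · obtain ⟨k, hk, rfl⟩ := hd
      rw [pv_wins_mem t ht] at hx
      obtain ⟨j, hj, rfl⟩ := hx
      refine ⟨1 + k + j, by omega, j, by omega, ?_⟩
      rw [pvP]
      exact congrArg List.prod (List.map_congr_left (fun i _ =>
        pv_E_congr li (by omega) (by omega)))

-- ===== VERDICT (by name: the statement is the Claim_ definition above) =====
theorem leftDiagonal_spec : Claim_equal_leftDiagonal := by
  intro li times _hdom hpre
  obtain ⟨hne, ht, _hrows⟩ := hpre
  unfold Spec_leftDiagonal
  have htn : times = ((times.toNat : Nat) : Int) := by omega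
  have ht1 : 1 ≤ times.toNat := by omega
  by_cases hb : times.toNat ≤ li.length ∧ times.toNat ≤ (li.headD []).length
  · rw [htn, pv_A_char li times.toNat ht1, pv_B_char li times.toNat ht1 hb.1 hb.2]
    exact pv_foldl_max_eq_of_mem_iff _ _ _ (pv_mem_iff li times.toNat ht1)
  · have hcol : PySem.List.pyGetD li 0 [] = li.headD [] := by
      cases li <;> simp [PySem.List.pyGetD, PySem.List.pyGet?, PySem.List.pyIdx?]
    have hB : leftDiagonal_alt li times = 0 := by
      simp only [leftDiagonal_alt, hcol]
      rw [if_pos (by push_cast; omega)]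
    have hA : leftDiagonal li times = 0 := by
      rw [htn, pv_A_char li times.toNat ht1]
      rcases not_and_or.mp hb with h | h
      · have h0 : li.length + 1 - times.toNat = 0 := by omega
        rw [h0]
        simp
      · have h0 : (li.headD []).length + 1 - times.toNat = 0 := by omega
        rw [h0]
        have hnil : (List.range (li.length + 1 - times.toNat)).flatMap
            (fun r => (List.range 0).map (fun c => pvP li times.toNat r c)) = [] :=
          List.flatMap_eq_nil_iff.mpr (fun x _ => by simp)
        rw [hnil]
        rfl
    rw [hA, hB]
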